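-- pv_equiv track=rewrite | github.com/theosfa/programming | Irina/2022-05-12/2022-04-21/test2.py | codify_list
-- ===== SOURCE A (Python) =====
-- def codify_list(txt: str) -> list:
--     list1 = [[],
--              [],
--              [],
--              []]
--     for i in range(0, len(txt), 6):
--         list1[0].append(list(txt)[i])
--     for i in range(1, len(txt), 2):
--         if i % 3 != 0:
--             list1[1].append(list(txt)[i])
--     for i in range(2, len(txt), 2):
--         if i % 2 == 0 and i % 6 != 0:
--             list1[2].append(list(txt)[i])
--     for i in range(3, len(txt), 6):
--         list1[3].append(list(txt)[i])
--     return list1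
-- ===== SOURCE B (Python) =====
-- def codify_list(txt: str) -> list:
--     buckets = [[], [], [], []]
--     mapping = [0, 1, 2, 3, 2, 1]
--     for i, c in enumerate(txt):
--         buckets[mapping[i % 6]].append(c)
--     return buckets
-- ===== Notes on version B (the rewrite author's own statement) =====
-- stated objective: faster
-- what changed: Replaces A's four separate strided loops (each rebuilding list(txt) on every append) with one enumerate pass dispatching each character through a residue-mod-6 lookup table into the four buckets.
import Mathlib
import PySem

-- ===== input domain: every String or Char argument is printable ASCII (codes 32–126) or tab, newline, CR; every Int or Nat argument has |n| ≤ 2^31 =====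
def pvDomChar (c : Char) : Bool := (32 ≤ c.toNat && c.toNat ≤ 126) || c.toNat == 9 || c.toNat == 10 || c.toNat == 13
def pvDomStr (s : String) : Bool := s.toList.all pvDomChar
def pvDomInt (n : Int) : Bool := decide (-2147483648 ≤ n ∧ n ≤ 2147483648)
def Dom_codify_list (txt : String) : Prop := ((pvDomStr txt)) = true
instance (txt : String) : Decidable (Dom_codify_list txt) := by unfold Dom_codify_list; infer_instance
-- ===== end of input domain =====

-- B replaces A's four strided loops (each rebuilding list(txt) per append) by one enumerate
-- pass with a residue-mod-6 dispatch table; equivalence of the return values is proved below.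

-- ===== PORT A =====
-- literal port of A: four strided loops over range(a, len, s), each appending list(txt)[i]
def codify_list (txt : String) : List (List String) :=
  let n : Int := PySem.Str.len txt
  let cs : List String := txt.toList.map (fun c => String.ofList [c])  -- list(txt): one-char strings
  let l0 := (PySem.List.pyRange 0 n 6).foldl (fun acc i => acc ++ [PySem.List.pyGetD cs i ""]) []
  let l1 := (PySem.List.pyRange 1 n 2).foldl (fun acc i =>
      if PySem.Int.mod i 3 ≠ 0 then acc ++ [PySem.List.pyGetD cs i ""] else acc) []
  let l2 := (PySem.List.pyRange 2 n 2).foldl (fun acc i =>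
      if PySem.Int.mod i 2 = 0 ∧ PySem.Int.mod i 6 ≠ 0 then acc ++ [PySem.List.pyGetD cs i ""] else acc) []
  let l3 := (PySem.List.pyRange 3 n 6).foldl (fun acc i => acc ++ [PySem.List.pyGetD cs i ""]) []
  [l0, l1, l2, l3]

-- ===== PORT B =====
def pvTable : List Nat := [0, 1, 2, 3, 2, 1]   -- mapping = [0,1,2,3,2,1]

-- one step of B's loop body: buckets[mapping[i % 6]].append(c)
def pvStep (st : List String × List String × List String × List String) (p : Int × String) :
    List String × List String × List String × List String :=
  let k := pvTable.getD (PySem.Int.mod p.1 6).toNat 0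
  match st with
  | (b0, b1, b2, b3) =>
    if k = 0 then (b0 ++ [p.2], b1, b2, b3)
    else if k = 1 then (b0, b1 ++ [p.2], b2, b3)
    else if k = 2 then (b0, b1, b2 ++ [p.2], b3)
    else (b0, b1, b2, b3 ++ [p.2])

def codify_list_alt (txt : String) : List (List String) :=
  let cs : List String := txt.toList.map (fun c => String.ofList [c])
  match (PySem.List.enumerate cs).foldl pvStep ([], [], [], []) with
  | (b0, b1, b2, b3) => [b0, b1, b2, b3]

-- ===== PRECONDITION & SPEC =====
def Spec_codify_list (txt : String) (out : List (List String)) : Prop := out = codify_list_alt txt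
instance (txt : String) (out : List (List String)) : Decidable (Spec_codify_list txt out) := by unfold Spec_codify_list; infer_instance

-- ===== CLAIM (what is proved, stated in full; the proofs are below) =====
def Claim_equal_codify_list : Prop := ∀ (txt : String), Dom_codify_list txt → Spec_codify_list txt (codify_list txt)

-- ===== LEMMAS AND PROOFS =====

-- bucket selected by B for index j
def pvSel (j : Int) : Nat := pvTable.getD (PySem.Int.mod j 6).toNat 0

-- the k-th component accumulated by B's fold
def pvF (k : Nat) (xs : List (Int × String)) : List String :=
  (xs.filter (fun p => decide (pvSel p.1 = k))).map (·.2)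

theorem pvSel_emod (x : Int) : pvSel x = pvTable.getD (x % 6).toNat 0 := by
  unfold pvSel; rw [PySem.Int.mod_eq_emod_of_pos (by norm_num)]

theorem pvSel_le (j : Int) : pvSel j ≤ 3 := by
  have h1 := PySem.Int.mod_lt j (b := 6) (by norm_num)
  have h0 := PySem.Int.mod_nonneg j (b := 6) (by norm_num)
  unfold pvSel
  set r : Nat := (PySem.Int.mod j 6).toNat with hr
  have hlt : r < 6 := by omega
  interval_cases r <;> decide

theorem pvFold (xs : List (Int × String)) (b0 b1 b2 b3 : List String) :
    xs.foldl pvStep (b0, b1, b2, b3)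
      = (b0 ++ pvF 0 xs, b1 ++ pvF 1 xs, b2 ++ pvF 2 xs, b3 ++ pvF 3 xs) := by
  induction xs generalizing b0 b1 b2 b3 with
  | nil => simp [pvF]
  | cons p xs ih =>
    have hle := pvSel_le p.1
    have hk : pvStep (b0, b1, b2, b3) p =
        (if pvSel p.1 = 0 then (b0 ++ [p.2], b1, b2, b3)
         else if pvSel p.1 = 1 then (b0, b1 ++ [p.2], b2, b3)
         else if pvSel p.1 = 2 then (b0, b1, b2 ++ [p.2], b3)
         else (b0, b1, b2, b3 ++ [p.2])) := rfl
    rcases (by omega : pvSel p.1 = 0 ∨ pvSel p.1 = 1 ∨ pvSel p.1 = 2 ∨ pvSel p.1 = 3) with h | h | h | h <;>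
      simp only [List.foldl_cons, hk, h, if_true] <;>
      rw [ih] <;>
      simp [pvF, h, List.append_assoc]

-- two strictly increasing integer lists with the same members are equal
theorem pvEqOfMem {l1 l2 : List Int} (h1 : l1.Pairwise (· < ·)) (h2 : l2.Pairwise (· < ·))
    (hm : ∀ x, x ∈ l1 ↔ x ∈ l2) : l1 = l2 := by
  have n1 : l1.Nodup := h1.imp ne_of_lt
  have n2 : l2.Nodup := h2.imp ne_of_lt
  have hp : List.Perm l1 l2 := List.perm_of_nodup_nodup_toFinset_eq n1 n2 (by ext a; simp [hm a])
  exact hp.eq_of_pairwise (fun a b _ _ h h' => absurd h' (lt_asymm h)) h1 h2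

theorem pvPairwise (a n s : Int) (hs : 0 < s) : (PySem.List.pyRange a n s).Pairwise (· < ·) := by
  rw [PySem.List.pyRange_of_pos a n hs]
  refine List.pairwise_map.mpr (List.pairwise_lt_range.imp ?_)
  intro i j hij
  have := mul_lt_mul_of_pos_left (show (i:Int) < j by exact_mod_cast hij) hs
  omega

-- index-list equalities, one per bucket: A's strided loop visits exactly the
-- indices j < n that B's table sends to that bucket, in the same order
theorem pvIdx0 (n : Int) :
    PySem.List.pyRange 0 n 6 = (PySem.List.pyRange 0 n 1).filter (fun j => decide (pvSel j = 0)) := by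
  refine pvEqOfMem (pvPairwise 0 n 6 (by norm_num)) ((pvPairwise 0 n 1 (by norm_num)).filter _) ?_
  intro x
  simp only [List.mem_filter, decide_eq_true_eq, PySem.List.mem_pyRange_one,
    PySem.List.mem_pyRange_iff_of_pos (by norm_num : (0:Int) < 6)]
  have hsel := pvSel_emod x
  rcases (by omega : x % 6 = 0 ∨ x % 6 = 1 ∨ x % 6 = 2 ∨ x % 6 = 3 ∨ x % 6 = 4 ∨ x % 6 = 5) with h|h|h|h|h|h <;>
    rw [h] at hsel <;> norm_num [pvTable] at hsel <;> simp [hsel] <;> omega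

theorem pvIdx1 (n : Int) :
    (PySem.List.pyRange 1 n 2).filter (fun i => decide (PySem.Int.mod i 3 ≠ 0))
      = (PySem.List.pyRange 0 n 1).filter (fun j => decide (pvSel j = 1)) := by
  refine pvEqOfMem ((pvPairwise 1 n 2 (by norm_num)).filter _) ((pvPairwise 0 n 1 (by norm_num)).filter _) ?_
  intro x
  simp only [List.mem_filter, decide_eq_true_eq, PySem.List.mem_pyRange_one,
    PySem.List.mem_pyRange_iff_of_pos (by norm_num : (0:Int) < 2),
    PySem.Int.mod_eq_emod_of_pos (show (0:Int) < 3 by norm_num)]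
  have hsel := pvSel_emod x
  rcases (by omega : x % 6 = 0 ∨ x % 6 = 1 ∨ x % 6 = 2 ∨ x % 6 = 3 ∨ x % 6 = 4 ∨ x % 6 = 5) with h|h|h|h|h|h <;>
    rw [h] at hsel <;> norm_num [pvTable] at hsel <;> simp [hsel] <;> omega

theorem pvIdx2 (n : Int) :
    (PySem.List.pyRange 2 n 2).filter (fun i => decide (PySem.Int.mod i 2 = 0 ∧ PySem.Int.mod i 6 ≠ 0))
      = (PySem.List.pyRange 0 n 1).filter (fun j => decide (pvSel j = 2)) := by
  refine pvEqOfMem ((pvPairwise 2 n 2 (by norm_num)).filter _) ((pvPairwise 0 n 1 (by norm_num)).filter _) ?_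
  intro x
  simp only [List.mem_filter, decide_eq_true_eq, PySem.List.mem_pyRange_one,
    PySem.List.mem_pyRange_iff_of_pos (by norm_num : (0:Int) < 2),
    PySem.Int.mod_eq_emod_of_pos (show (0:Int) < 2 by norm_num),
    PySem.Int.mod_eq_emod_of_pos (show (0:Int) < 6 by norm_num)]
  have hsel := pvSel_emod x
  rcases (by omega : x % 6 = 0 ∨ x % 6 = 1 ∨ x % 6 = 2 ∨ x % 6 = 3 ∨ x % 6 = 4 ∨ x % 6 = 5) with h|h|h|h|h|h <;>
    rw [h] at hsel <;> norm_num [pvTable] at hsel <;> simp [hsel] <;> omega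

theorem pvIdx3 (n : Int) :
    PySem.List.pyRange 3 n 6 = (PySem.List.pyRange 0 n 1).filter (fun j => decide (pvSel j = 3)) := by
  refine pvEqOfMem (pvPairwise 3 n 6 (by norm_num)) ((pvPairwise 0 n 1 (by norm_num)).filter _) ?_
  intro x
  simp only [List.mem_filter, decide_eq_true_eq, PySem.List.mem_pyRange_one,
    PySem.List.mem_pyRange_iff_of_pos (by norm_num : (0:Int) < 6)]
  have hsel := pvSel_emod x
  rcases (by omega : x % 6 = 0 ∨ x % 6 = 1 ∨ x % 6 = 2 ∨ x % 6 = 3 ∨ x % 6 = 4 ∨ x % 6 = 5) with h|h|h|h|h|h <;>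
    rw [h] at hsel <;> norm_num [pvTable] at hsel <;> simp [hsel] <;> omega

-- B's bucket k over the enumerated list, re-expressed over the bare index range
theorem pvF_map (cs : List String) (k : Nat) :
    pvF k ((PySem.List.pyRange 0 (PySem.List.len cs) 1).map (fun j => (j, PySem.List.pyGetD cs j "")))
      = ((PySem.List.pyRange 0 (PySem.List.len cs) 1).filter (fun j => decide (pvSel j = k))).map
          (fun j => PySem.List.pyGetD cs j "") := by
  unfold pvF
  rw [List.filter_map, List.map_map]
  rfl

-- ===== VERDICT (by name: the statement is the Claim_ definition above) =====
theorem codify_list_spec : Claim_equal_codify_list := by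
  intro txt _
  unfold Spec_codify_list codify_list codify_list_alt
  dsimp only
  set cs : List String := txt.toList.map (fun c => String.ofList [c]) with hcs
  have hlen : PySem.Str.len txt = PySem.List.len cs := by
    simp [hcs, PySem.Str.len_eq, PySem.List.len_eq]
  rw [PySem.List.enumerate_eq_map_pyRange cs "", pvFold]
  simp only [List.nil_append, pvF_map, hlen,
    PySem.List.foldl_append_singleton_eq_map, PySem.List.foldl_append_ite]
  rw [pvIdx0, pvIdx1, pvIdx2, pvIdx3]
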